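-- pv_equiv track=rewrite | github.com/stww-git/youtube-shorts | channels/family-health-kr/src/motion_effects.py | _split_by_char_ratio
-- ===== SOURCE A (Python) =====
-- def _split_by_char_ratio(words: list, targets: list) -> list:
--     """
--     글자수 비율로 어절 목록을 분할합니다.
--     어절 경계를 유지하면서 목표 글자수에 가장 가까운 지점에서 분할합니다.
--
--     Args:
--         words: 어절 목록
--         targets: 분할 목표 글자수 리스트 (누적값, 예: [7, 14, 21])
--
--     Returns:
--         분할된 문자열 리스트
--     """
--     if not words:
--         return []
--
--     # 각 어절까지의 누적 글자수 계산 (공백 제외)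
--     cumulative_chars = []
--     total = 0
--     for w in words:
--         total += len(w)
--         cumulative_chars.append(total)
--
--     parts = []
--     prev_idx = 0
--
--     for target in targets[:-1]:  # 마지막 target은 전체 길이이므로 제외
--         # 목표 글자수에 가장 가까운 어절 경계 찾기
--         best_idx = prev_idx
--         min_diff = float('inf')
--
--         for i in range(prev_idx, len(words)):
--             diff = abs(cumulative_chars[i] - target)
--             if diff < min_diff:
--                 min_diff = diff
--                 best_idx = i
--
--         # 분할점이 이전과 같으면 최소 1어절 포함
--         if best_idx == prev_idx and prev_idx < len(words) - 1:
--             best_idx = prev_idx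
--
--         # 파트 추가
--         part = " ".join(words[prev_idx:best_idx + 1])
--         if part:
--             parts.append(part)
--         prev_idx = best_idx + 1
--
--     # 남은 어절 추가
--     if prev_idx < len(words):
--         remaining = " ".join(words[prev_idx:])
--         if remaining:
--             parts.append(remaining)
--
--     return parts
-- ===== SOURCE B (Python) =====
-- def _split_by_char_ratio(words: list, targets: list) -> list:
--     """Same result as A, but each split boundary is found by binary search on the
--     monotone cumulative-character prefix instead of a linear scan."""
--     if not words:
--         return []
--     n = len(words)
--     cum = []
--     total = 0
--     for w in words:
--         total += len(w)
--         cum.append(total)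
--
--     def leftmost_ge(lo, hi, x):
--         # leftmost index i in [lo, hi) with cum[i] >= x, or hi if none
--         while lo < hi:
--             mid = (lo + hi) // 2
--             if cum[mid] < x:
--                 lo = mid + 1
--             else:
--                 hi = mid
--         return lo
--
--     parts = []
--     prev = 0
--     for target in targets[:-1]:
--         if prev >= n:
--             best = prev
--         else:
--             j = leftmost_ge(prev, n, target)
--             if j == n:
--                 best = leftmost_ge(prev, n, cum[n - 1])
--             elif j == prev:
--                 best = prev
--             else:
--                 if target - cum[j - 1] <= cum[j] - target:
--                     best = leftmost_ge(prev, j, cum[j - 1])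
--                 else:
--                     best = j
--         part = " ".join(words[prev:best + 1])
--         if part:
--             parts.append(part)
--         prev = best + 1
--     if prev < n:
--         remaining = " ".join(words[prev:])
--         if remaining:
--             parts.append(remaining)
--     return parts
-- ===== Notes on version B (the rewrite author's own statement) =====
-- stated objective: faster
-- what changed: Each split boundary is found by leftmost binary search on the monotone cumulative-character prefix (plus a second binary search to pick the first index of a tied value), replacing A's linear scan over all remaining words for every target.
import Mathlib
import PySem

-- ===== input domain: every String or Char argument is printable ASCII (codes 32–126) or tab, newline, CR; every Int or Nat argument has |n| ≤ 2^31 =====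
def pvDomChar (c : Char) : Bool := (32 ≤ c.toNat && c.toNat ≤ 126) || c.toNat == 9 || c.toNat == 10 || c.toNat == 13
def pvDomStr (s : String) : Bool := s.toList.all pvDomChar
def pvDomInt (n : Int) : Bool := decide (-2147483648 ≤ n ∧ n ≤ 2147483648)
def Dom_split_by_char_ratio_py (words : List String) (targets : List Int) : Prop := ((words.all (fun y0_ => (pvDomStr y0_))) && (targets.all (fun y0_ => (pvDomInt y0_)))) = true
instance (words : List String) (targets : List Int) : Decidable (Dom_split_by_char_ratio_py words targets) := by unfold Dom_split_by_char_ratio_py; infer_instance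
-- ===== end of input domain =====

-- B finds each split boundary by binary search on the monotone cumulative-character
-- prefix instead of A's linear scan over the remaining words (objective: faster).

-- cumulative character counts (same loop in both Pythons)
def pvCum (words : List String) : List Int :=
  (words.foldl
    (fun (p : List Int × Int) w =>
      (p.1 ++ [p.2 + PySem.Str.len w], p.2 + PySem.Str.len w)) ([], 0)).1

-- trailing 'remaining' block (same code in both Pythons); st = (parts, prev_idx)
def pvTail (words : List String) (st : List String × Int) : List String :=
  if st.2 < (words.length : Int) then
    let remaining := PySem.Str.join " " (PySem.List.slice words (some st.2) none)
    if remaining ≠ "" then st.1 ++ [remaining] else st.1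
  else st.1

-- ===== PORT A =====
-- inner loop body of A: running (best_idx, min_diff), min_diff = none meaning inf
def A_inner (cum : List Int) (target : Int) (bm : Int × Option Int) (i : Int) : Int × Option Int :=
  let diff := |PySem.List.pyGetD cum i 0 - target|
  match bm.2 with
  | none => (i, some diff)
  | some m => if diff < m then (i, some diff) else bm

-- body of A's loop over targets[:-1]
def A_outer (words : List String) (cum : List Int) (st : List String × Int) (target : Int) :
    List String × Int :=
  let inner := (PySem.List.pyRange st.2 (words.length : Int) 1).foldl (A_inner cum target) (st.2, none)
  let best := if inner.1 = st.2 ∧ st.2 < (words.length : Int) - 1 then st.2 else inner.1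
  let part := PySem.Str.join " " (PySem.List.slice words (some st.2) (some (best + 1)))
  ((if part ≠ "" then st.1 ++ [part] else st.1), best + 1)

def split_by_char_ratio_py (words : List String) (targets : List Int) : List String :=
  if words = [] then []
  else
    pvTail words
      ((PySem.List.slice targets none (some (-1))).foldl (A_outer words (pvCum words)) ([], 0))

-- ===== PORT B =====
-- termination helper for the binary-search loop (cited by decreasing_by)
theorem pvMidBounds (lo hi : Int) (h : lo < hi) :
    lo ≤ PySem.Int.floordiv (lo + hi) 2 ∧ PySem.Int.floordiv (lo + hi) 2 < hi := by
  constructor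
  · exact (PySem.Int.floordiv_two_mid_bounds (le_of_lt h)).1
  · rw [PySem.Int.floordiv_lt_iff_lt_mul (by omega)]; omega

-- transliteration of Source B's leftmost_ge while-loop
def altLeftmostGE (cum : List Int) (lo hi x : Int) : Int :=
  if h : lo < hi then
    let mid := PySem.Int.floordiv (lo + hi) 2
    if PySem.List.pyGetD cum mid 0 < x then altLeftmostGE cum (mid + 1) hi x
    else altLeftmostGE cum lo mid x
  else lo
termination_by (hi - lo).toNat
decreasing_by
  · have := pvMidBounds lo hi h; omega
  · have := pvMidBounds lo hi h; omega

-- Source B's per-target boundary choice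
def altBest (cum : List Int) (n prev target : Int) : Int :=
  if prev ≥ n then prev
  else
    let j := altLeftmostGE cum prev n target
    if j = n then altLeftmostGE cum prev n (PySem.List.pyGetD cum (n - 1) 0)
    else if j = prev then prev
    else if target - PySem.List.pyGetD cum (j - 1) 0 ≤ PySem.List.pyGetD cum j 0 - target then
      altLeftmostGE cum prev j (PySem.List.pyGetD cum (j - 1) 0)
    else j

-- body of B's loop over targets[:-1]
def B_outer (words : List String) (cum : List Int) (st : List String × Int) (target : Int) :
    List String × Int :=
  let best := altBest cum (words.length : Int) st.2 target
  let part := PySem.Str.join " " (PySem.List.slice words (some st.2) (some (best + 1)))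
  ((if part ≠ "" then st.1 ++ [part] else st.1), best + 1)

def split_by_char_ratio_py_alt (words : List String) (targets : List Int) : List String :=
  if words = [] then []
  else
    pvTail words
      ((PySem.List.slice targets none (some (-1))).foldl (B_outer words (pvCum words)) ([], 0))

-- ===== PRECONDITION & SPEC =====
def Spec_split_by_char_ratio_py (words : List String) (targets : List Int) (out : List String) : Prop := out = split_by_char_ratio_py_alt words targets
instance (words : List String) (targets : List Int) (out : List String) : Decidable (Spec_split_by_char_ratio_py words targets out) := by unfold Spec_split_by_char_ratio_py; infer_instance

-- ===== CLAIM (what is proved, stated in full; the proofs are below) =====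
def Claim_equal_split_by_char_ratio_py : Prop := ∀ (words : List String) (targets : List Int), Dom_split_by_char_ratio_py words targets → Spec_split_by_char_ratio_py words targets (split_by_char_ratio_py words targets)

-- ===== LEMMAS AND PROOFS =====

theorem pv_len_nonneg (s : String) : 0 ≤ PySem.Str.len s := by
  rw [PySem.Str.len_eq]; exact_mod_cast Nat.zero_le _

-- the cumulative-characters list, as prefix sums
def pvPsums (t : Int) : List String → List Int
  | [] => []
  | w :: ws => (t + PySem.Str.len w) :: pvPsums (t + PySem.Str.len w) ws

theorem pv_foldl_cum (ws : List String) : ∀ (acc : List Int) (t : Int),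
    (ws.foldl (fun (p : List Int × Int) w =>
      (p.1 ++ [p.2 + PySem.Str.len w], p.2 + PySem.Str.len w)) (acc, t)).1
      = acc ++ pvPsums t ws := by
  induction ws with
  | nil => intro acc t; simp [pvPsums]
  | cons w ws ih =>
    intro acc t
    rw [List.foldl_cons]
    have := ih (acc ++ [t + PySem.Str.len w]) (t + PySem.Str.len w)
    simpa [pvPsums] using this

theorem pv_cum_eq (words : List String) : pvCum words = pvPsums 0 words := by
  rw [pvCum, pv_foldl_cum]; rfl

theorem pv_psums_length (ws : List String) : ∀ t, (pvPsums t ws).length = ws.length := by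
  induction ws with
  | nil => intro t; rfl
  | cons w ws ih => intro t; simp [pvPsums, ih]

theorem pv_le_psums (ws : List String) : ∀ t, ∀ x ∈ pvPsums t ws, t ≤ x := by
  induction ws with
  | nil => intro t x hx; simp [pvPsums] at hx
  | cons w ws ih =>
    intro t x hx
    have hw := pv_len_nonneg w
    simp only [pvPsums] at hx
    rcases List.mem_cons.mp hx with hx | hx
    · omega
    · have := ih (t + PySem.Str.len w) x hx; omega

theorem pv_psums_pairwise (ws : List String) : ∀ t, (pvPsums t ws).Pairwise (· ≤ ·) := by
  induction ws with
  | nil => intro t; simp [pvPsums]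
  | cons w ws ih =>
    intro t
    simp only [pvPsums]
    refine List.Pairwise.cons ?_ (ih _)
    intro x hx
    have := pv_le_psums ws (t + PySem.Str.len w) x hx
    have hw := pv_len_nonneg w
    omega

theorem pv_getD_mono (cum : List Int) (hm : cum.Pairwise (· ≤ ·)) (i j : Int)
    (h0 : 0 ≤ i) (hij : i ≤ j) (hj : j < (cum.length : Int)) :
    PySem.List.pyGetD cum i 0 ≤ PySem.List.pyGetD cum j 0 := by
  rw [PySem.List.pyGetD_eq_getElem cum 0 h0 (by omega),
    PySem.List.pyGetD_eq_getElem cum 0 (by omega) hj]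
  rcases eq_or_lt_of_le hij with h | h
  · subst h; exact le_rfl
  · exact List.pairwise_iff_getElem.mp hm i.toNat j.toNat (by omega) (by omega) (by omega)

theorem pv_abs_lt (a t : Int) (h : a < t) : |a - t| = t - a := by
  rw [abs_of_neg (by omega)]; ring

theorem pv_abs_ge (a t : Int) (h : t ≤ a) : |a - t| = a - t := abs_of_nonneg (by omega)

-- the defining property of A's chosen index: first minimizer of |cum[i] - target| on [prev, n)
def pvP (cum : List Int) (target prev i : Int) : Prop :=
  prev ≤ i ∧ i < (cum.length : Int) ∧
  (∀ k, prev ≤ k → k < i →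
    |PySem.List.pyGetD cum i 0 - target| < |PySem.List.pyGetD cum k 0 - target|) ∧
  (∀ k, i ≤ k → k < (cum.length : Int) →
    |PySem.List.pyGetD cum i 0 - target| ≤ |PySem.List.pyGetD cum k 0 - target|)

theorem pvP_unique (cum : List Int) (target prev i i' : Int)
    (h : pvP cum target prev i) (h' : pvP cum target prev i') : i = i' := by
  obtain ⟨hi1, hi2, hi3, hi4⟩ := h
  obtain ⟨hj1, hj2, hj3, hj4⟩ := h'
  by_contra hne
  rcases lt_or_gt_of_ne hne with hlt | hlt
  · have a1 := hj3 i hi1 hlt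
    have a2 := hi4 i' (le_of_lt hlt) hj2
    linarith
  · have a1 := hi3 i' hj1 hlt
    have a2 := hj4 i (le_of_lt hlt) hi2
    linarith

theorem pv_lge_ge_fuel (cum : List Int) (x : Int) :
    ∀ (fuel : Nat) (lo hi : Int), (hi - lo).toNat ≤ fuel → lo ≤ altLeftmostGE cum lo hi x := by
  intro fuel
  induction fuel with
  | zero =>
    intro lo hi hf
    rw [altLeftmostGE, dif_neg (by omega)]
  | succ fuel ih =>
    intro lo hi hf
    by_cases h : lo < hi
    · have hmid := pvMidBounds lo hi h
      rw [altLeftmostGE, dif_pos h]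
      by_cases hc : PySem.List.pyGetD cum (PySem.Int.floordiv (lo + hi) 2) 0 < x
      · rw [if_pos hc]
        have := ih (PySem.Int.floordiv (lo + hi) 2 + 1) hi (by omega)
        omega
      · rw [if_neg hc]
        exact ih lo (PySem.Int.floordiv (lo + hi) 2) (by omega)
    · rw [altLeftmostGE, dif_neg h]

theorem pv_lge_ge (cum : List Int) (lo hi x : Int) : lo ≤ altLeftmostGE cum lo hi x :=
  pv_lge_ge_fuel cum x (hi - lo).toNat lo hi le_rfl

theorem pv_lge_spec (cum : List Int) (hm : cum.Pairwise (· ≤ ·)) (x : Int) :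
    ∀ (fuel : Nat) (lo hi : Int), (hi - lo).toNat ≤ fuel → 0 ≤ lo → lo ≤ hi →
    hi ≤ (cum.length : Int) →
    altLeftmostGE cum lo hi x ≤ hi ∧
    (∀ k, lo ≤ k → k < altLeftmostGE cum lo hi x → PySem.List.pyGetD cum k 0 < x) ∧
    (altLeftmostGE cum lo hi x < hi → x ≤ PySem.List.pyGetD cum (altLeftmostGE cum lo hi x) 0) := by
  intro fuel
  induction fuel with
  | zero =>
    intro lo hi hf h0 hlh hhn
    rw [altLeftmostGE, dif_neg (by omega)]
    refine ⟨hlh, ?_, ?_⟩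
    · intro k hk1 hk2; omega
    · intro h; omega
  | succ fuel ih =>
    intro lo hi hf h0 hlh hhn
    by_cases h : lo < hi
    · have hmid := pvMidBounds lo hi h
      rw [altLeftmostGE, dif_pos h]
      by_cases hc : PySem.List.pyGetD cum (PySem.Int.floordiv (lo + hi) 2) 0 < x
      · rw [if_pos hc]
        obtain ⟨ha, hb, hcc⟩ := ih (PySem.Int.floordiv (lo + hi) 2 + 1) hi (by omega) (by omega)
          (by omega) hhn
        refine ⟨ha, ?_, hcc⟩
        intro k hk1 hk2
        by_cases hk : k ≤ PySem.Int.floordiv (lo + hi) 2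
        · have : PySem.List.pyGetD cum k 0 ≤ PySem.List.pyGetD cum (PySem.Int.floordiv (lo + hi) 2) 0 :=
            pv_getD_mono cum hm k _ (by omega) hk (by omega)
          omega
        · exact hb k (by omega) hk2
      · rw [if_neg hc]
        obtain ⟨ha, hb, hcc⟩ := ih lo (PySem.Int.floordiv (lo + hi) 2) (by omega) h0 (by omega)
          (by omega)
        refine ⟨by omega, hb, ?_⟩
        intro _
        rcases eq_or_lt_of_le ha with he | he
        · rw [he]; omega
        · exact hcc he
    · rw [altLeftmostGE, dif_neg h]
      refine ⟨hlh, ?_, ?_⟩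
      · intro k hk1 hk2; omega
      · intro hlt; exact absurd hlt (by omega)

theorem pv_lge_full (cum : List Int) (hm : cum.Pairwise (· ≤ ·)) (x lo hi : Int)
    (h0 : 0 ≤ lo) (hlh : lo ≤ hi) (hhn : hi ≤ (cum.length : Int)) :
    altLeftmostGE cum lo hi x ≤ hi ∧
    (∀ k, lo ≤ k → k < altLeftmostGE cum lo hi x → PySem.List.pyGetD cum k 0 < x) ∧
    (altLeftmostGE cum lo hi x < hi → x ≤ PySem.List.pyGetD cum (altLeftmostGE cum lo hi x) 0) :=
  pv_lge_spec cum hm x (hi - lo).toNat lo hi le_rfl h0 hlh hhn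

theorem pv_altBest_mem (cum : List Int) (hm : cum.Pairwise (· ≤ ·)) (target prev : Int)
    (h0 : 0 ≤ prev) (hlt : prev < (cum.length : Int)) :
    pvP cum target prev (altBest cum (cum.length : Int) prev target) := by
  have hnn : ¬ prev ≥ (cum.length : Int) := by omega
  simp only [altBest, if_neg hnn]
  obtain ⟨hjle, hjlo, hjhi⟩ := pv_lge_full cum hm target prev (cum.length : Int) h0 (by omega) le_rfl
  have hjge : prev ≤ altLeftmostGE cum prev (cum.length : Int) target := pv_lge_ge cum prev _ target
  set n : Int := (cum.length : Int) with hndef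
  set j := altLeftmostGE cum prev n target with hjdef
  by_cases hje : j = n
  · rw [if_pos hje]
    obtain ⟨hble, hblo, hbhi⟩ :=
      pv_lge_full cum hm (PySem.List.pyGetD cum (n - 1) 0) prev n h0 (by omega) le_rfl
    have hbge : prev ≤ altLeftmostGE cum prev n (PySem.List.pyGetD cum (n - 1) 0) :=
      pv_lge_ge cum prev n _
    set b := altLeftmostGE cum prev n (PySem.List.pyGetD cum (n - 1) 0) with hbdef
    have hbn : b < n := by
      by_contra hc
      have := hblo (n - 1) (by omega) (by omega)
      omega
    have hcb : PySem.List.pyGetD cum b 0 = PySem.List.pyGetD cum (n - 1) 0 := by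
      have h1 := pv_getD_mono cum hm b (n - 1) (by omega) (by omega) (by omega)
      have h2 := hbhi hbn
      omega
    have halllt : ∀ k, prev ≤ k → k < n → PySem.List.pyGetD cum k 0 < target := by
      intro k hk1 hk2; exact hjlo k hk1 (by omega)
    have hblt : PySem.List.pyGetD cum b 0 < target := halllt b hbge hbn
    refine ⟨hbge, hbn, ?_, ?_⟩
    · intro k hk1 hk2
      have hk3 := hblo k hk1 hk2
      have hklt := halllt k hk1 (by omega)
      rw [pv_abs_lt _ _ hblt, pv_abs_lt _ _ hklt]
      omega
    · intro k hk1 hk2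
      have hkle : PySem.List.pyGetD cum k 0 ≤ PySem.List.pyGetD cum (n - 1) 0 :=
        pv_getD_mono cum hm k (n - 1) (by omega) (by omega) (by omega)
      have hklt := halllt k (by omega) hk2
      rw [pv_abs_lt _ _ hblt, pv_abs_lt _ _ hklt]
      omega
  · rw [if_neg hje]
    have hjn : j < n := by omega
    have hjtar : target ≤ PySem.List.pyGetD cum j 0 := hjhi hjn
    by_cases hjp : j = prev
    · rw [if_pos hjp]
      refine ⟨le_rfl, by omega, ?_, ?_⟩
      · intro k hk1 hk2; omega
      · intro k hk1 hk2
        have hple : PySem.List.pyGetD cum prev 0 ≤ PySem.List.pyGetD cum k 0 :=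
          pv_getD_mono cum hm prev k h0 hk1 hk2
        have hptar : target ≤ PySem.List.pyGetD cum prev 0 := by rw [← hjp]; exact hjtar
        rw [pv_abs_ge _ _ hptar, pv_abs_ge _ _ (le_trans hptar hple)]
        omega
    · rw [if_neg hjp]
      have hjgt : prev < j := by omega
      have hjm1 : PySem.List.pyGetD cum (j - 1) 0 < target := hjlo (j - 1) (by omega) (by omega)
      by_cases hba : target - PySem.List.pyGetD cum (j - 1) 0 ≤ PySem.List.pyGetD cum j 0 - target
      · rw [if_pos hba]
        obtain ⟨hble, hblo, hbhi⟩ :=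
          pv_lge_full cum hm (PySem.List.pyGetD cum (j - 1) 0) prev j h0 (by omega) (by omega)
        have hbge : prev ≤ altLeftmostGE cum prev j (PySem.List.pyGetD cum (j - 1) 0) :=
          pv_lge_ge cum prev j _
        set b := altLeftmostGE cum prev j (PySem.List.pyGetD cum (j - 1) 0) with hbdef
        have hbj : b < j := by
          by_contra hc
          have := hblo (j - 1) (by omega) (by omega)
          omega
        have hcb : PySem.List.pyGetD cum b 0 = PySem.List.pyGetD cum (j - 1) 0 := by
          have h1 := pv_getD_mono cum hm b (j - 1) (by omega) (by omega) (by omega)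
          have h2 := hbhi hbj
          omega
        have hblt : PySem.List.pyGetD cum b 0 < target := by omega
        refine ⟨hbge, by omega, ?_, ?_⟩
        · intro k hk1 hk2
          have hk3 := hblo k hk1 hk2
          have hklt : PySem.List.pyGetD cum k 0 < target := by omega
          rw [pv_abs_lt _ _ hblt, pv_abs_lt _ _ hklt]
          omega
        · intro k hk1 hk2
          by_cases hkj : k < j
          · have hkle : PySem.List.pyGetD cum k 0 ≤ PySem.List.pyGetD cum (j - 1) 0 :=
              pv_getD_mono cum hm k (j - 1) (by omega) (by omega) (by omega)
            rw [pv_abs_lt _ _ hblt, pv_abs_lt _ _ (by omega)]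
            omega
          · have hkge : PySem.List.pyGetD cum j 0 ≤ PySem.List.pyGetD cum k 0 :=
              pv_getD_mono cum hm j k (by omega) (by omega) hk2
            rw [pv_abs_lt _ _ hblt, pv_abs_ge _ _ (by omega)]
            omega
      · rw [if_neg hba]
        refine ⟨by omega, hjn, ?_, ?_⟩
        · intro k hk1 hk2
          have hkle : PySem.List.pyGetD cum k 0 ≤ PySem.List.pyGetD cum (j - 1) 0 :=
            pv_getD_mono cum hm k (j - 1) (by omega) (by omega) (by omega)
          rw [pv_abs_ge _ _ hjtar, pv_abs_lt _ _ (by omega)]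
          omega
        · intro k hk1 hk2
          have hkge : PySem.List.pyGetD cum j 0 ≤ PySem.List.pyGetD cum k 0 :=
            pv_getD_mono cum hm j k (by omega) hk1 hk2
          rw [pv_abs_ge _ _ hjtar, pv_abs_ge _ _ (by omega)]
          omega

theorem pv_foldA_inv (cum : List Int) (target prev : Int) :
    ∀ (fuel : Nat) (a b : Int), ((cum.length : Int) - a).toNat ≤ fuel →
    a ≤ (cum.length : Int) → prev ≤ b → b < a →
    (∀ k, prev ≤ k → k < b →
      |PySem.List.pyGetD cum b 0 - target| < |PySem.List.pyGetD cum k 0 - target|) →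
    (∀ k, b ≤ k → k < a →
      |PySem.List.pyGetD cum b 0 - target| ≤ |PySem.List.pyGetD cum k 0 - target|) →
    pvP cum target prev
      (((PySem.List.pyRange a (cum.length : Int) 1).foldl (A_inner cum target)
        (b, some (|PySem.List.pyGetD cum b 0 - target|))).1) := by
  intro fuel
  induction fuel with
  | zero =>
    intro a b hf ha hpb hba h3 h4
    rw [PySem.List.pyRange_one_eq_nil (by omega), List.foldl_nil]
    exact ⟨hpb, by omega, h3, fun k hk1 hk2 => h4 k hk1 (by omega)⟩
  | succ fuel ih =>
    intro a b hf ha hpb hba h3 h4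
    by_cases h : a < (cum.length : Int)
    · rw [PySem.List.pyRange_one_cons h, List.foldl_cons]
      by_cases hc : |PySem.List.pyGetD cum a 0 - target| < |PySem.List.pyGetD cum b 0 - target|
      · have hstep : A_inner cum target (b, some (|PySem.List.pyGetD cum b 0 - target|)) a
            = (a, some (|PySem.List.pyGetD cum a 0 - target|)) := by
          simp [A_inner, if_pos hc]
        rw [hstep]
        refine ih (a + 1) a (by omega) (by omega) (by omega) (by omega) ?_ ?_
        · intro k hk1 hk2
          by_cases hkb : k < b
          · have := h3 k hk1 hkb; omega
          · have := h4 k (by omega) hk2; omega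
        · intro k hk1 hk2
          have hk : k = a := by omega
          subst hk; exact le_rfl
      · have hstep : A_inner cum target (b, some (|PySem.List.pyGetD cum b 0 - target|)) a
            = (b, some (|PySem.List.pyGetD cum b 0 - target|)) := by
          simp [A_inner, if_neg hc]
        rw [hstep]
        refine ih (a + 1) b (by omega) (by omega) hpb (by omega) h3 ?_
        intro k hk1 hk2
        by_cases hka : k < a
        · exact h4 k hk1 hka
        · have hk : k = a := by omega
          subst hk; omega
    · rw [PySem.List.pyRange_one_eq_nil (by omega), List.foldl_nil]
      exact ⟨hpb, by omega, h3, fun k hk1 hk2 => h4 k hk1 (by omega)⟩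

theorem pv_foldA_eq (cum : List Int) (hm : cum.Pairwise (· ≤ ·)) (target prev : Int)
    (h0 : 0 ≤ prev) :
    ((PySem.List.pyRange prev (cum.length : Int) 1).foldl (A_inner cum target) (prev, none)).1
      = altBest cum (cum.length : Int) prev target := by
  by_cases hlt : prev < (cum.length : Int)
  · rw [PySem.List.pyRange_one_cons hlt, List.foldl_cons]
    have hstep : A_inner cum target (prev, none) prev
        = (prev, some (|PySem.List.pyGetD cum prev 0 - target|)) := rfl
    rw [hstep]
    refine pvP_unique cum target prev _ _ ?_ (pv_altBest_mem cum hm target prev h0 hlt)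
    refine pv_foldA_inv cum target prev ((cum.length : Int) - (prev + 1)).toNat (prev + 1) prev
      le_rfl (by omega) le_rfl (by omega) ?_ ?_
    · intro k hk1 hk2; omega
    · intro k hk1 hk2
      have hk : k = prev := by omega
      subst hk; exact le_rfl
  · rw [PySem.List.pyRange_one_eq_nil (by omega), List.foldl_nil, altBest,
      if_pos (show prev ≥ (cum.length : Int) by omega)]

theorem pv_altBest_ge (cum : List Int) (n prev target : Int) :
    prev ≤ altBest cum n prev target := by
  simp only [altBest]
  split_ifs
  · exact le_rfl
  · exact pv_lge_ge cum prev n _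
  · exact le_rfl
  · exact pv_lge_ge cum prev _ _
  · exact pv_lge_ge cum prev n target

theorem pv_outer_eq (words : List String) (cum : List Int) (hm : cum.Pairwise (· ≤ ·))
    (hlen : cum.length = words.length) :
    ∀ (ts : List Int) (acc : List String × Int), 0 ≤ acc.2 →
    ts.foldl (A_outer words cum) acc = ts.foldl (B_outer words cum) acc := by
  intro ts
  induction ts with
  | nil => intro acc _; rfl
  | cons t ts ih =>
    intro acc h0
    have hn : (words.length : Int) = (cum.length : Int) := by rw [hlen]
    have hbest : ((PySem.List.pyRange acc.2 (words.length : Int) 1).foldl (A_inner cum t)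
        (acc.2, none)).1 = altBest cum (words.length : Int) acc.2 t := by
      rw [hn]; exact pv_foldA_eq cum hm t acc.2 h0
    have hstep : A_outer words cum acc t = B_outer words cum acc t := by
      rw [A_outer, B_outer]
      have hif : (if (((PySem.List.pyRange acc.2 (words.length : Int) 1).foldl (A_inner cum t)
            (acc.2, none)).1 = acc.2 ∧ acc.2 < (words.length : Int) - 1) then acc.2
          else ((PySem.List.pyRange acc.2 (words.length : Int) 1).foldl (A_inner cum t)
            (acc.2, none)).1) = altBest cum (words.length : Int) acc.2 t := by
        split_ifs with h
        · rw [← hbest, h.1]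
        · exact hbest
      rw [hif]
    rw [List.foldl_cons, List.foldl_cons, hstep]
    refine ih (B_outer words cum acc t) ?_
    have := pv_altBest_ge cum (words.length : Int) acc.2 t
    simp only [B_outer]
    omega

-- ===== VERDICT (by name: the statement is the Claim_ definition above) =====
theorem split_by_char_ratio_py_spec : Claim_equal_split_by_char_ratio_py := by
  intro words targets _
  rw [Spec_split_by_char_ratio_py, split_by_char_ratio_py, split_by_char_ratio_py_alt]
  by_cases hw : words = []
  · rw [if_pos hw, if_pos hw]
  · rw [if_neg hw, if_neg hw]
    refine congrArg (pvTail words) ?_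
    have hm : (pvCum words).Pairwise (· ≤ ·) := by
      rw [pv_cum_eq]; exact pv_psums_pairwise words 0
    have hlen : (pvCum words).length = words.length := by
      rw [pv_cum_eq]; exact pv_psums_length words 0
    exact pv_outer_eq words (pvCum words) hm hlen
      (PySem.List.slice targets none (some (-1))) ([], 0) le_rfl
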